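-- pv_equiv track=rewrite | github.com/chelseashin/My-Algorithm | programmers/Problem Solving/LINE_2.py | solution
-- ===== SOURCE A (Python) =====
-- def solution(ball, order):
--     answer = []
--     keep = []
--     for num in order:
--         if num == ball[0]:
--             answer.append(ball.pop(0))
--             if ball:
--                 K = len(keep)
--                 for _ in range(K):
--                     if ball[0] in keep:
--                         keep.remove(ball[0])
--                         answer.append(ball.pop(0))
--         elif num == ball[-1]:
--             answer.append(ball.pop())
--             if ball:
--                 K = len(keep)
--                 for _ in range(K):
--                     if ball[-1] in keep:
--                         keep.remove(ball[-1])
--                         answer.append(ball.pop())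
--         else:
--             keep.append(num)
--     return answer
-- ===== SOURCE B (Python) =====
-- def solution(ball, order):
--     # Two pointers over the untouched ball list + a dict counting kept numbers;
--     # unlike A, this does not mutate `ball`.
--     lo, hi = 0, len(ball) - 1
--     keep = {}
--     answer = []
--     for num in order:
--         if lo <= hi and num == ball[lo]:
--             answer.append(num)
--             lo += 1
--             while lo <= hi and keep.get(ball[lo], 0) > 0:
--                 keep[ball[lo]] -= 1
--                 answer.append(ball[lo])
--                 lo += 1
--         elif lo <= hi and num == ball[hi]:
--             answer.append(num)
--             hi -= 1
--             while lo <= hi and keep.get(ball[hi], 0) > 0: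
--                 keep[ball[hi]] -= 1
--                 answer.append(ball[hi])
--                 hi -= 1
--         else:
--             keep[num] = keep.get(num, 0) + 1
--     return answer
-- ===== Notes on version B (the rewrite author's own statement) =====
-- stated objective: faster
-- what changed: Replaces A's in-place list simulation (pop(0)/pop(), linear membership and remove on a keep list) by two index pointers over the untouched ball list plus a dict counting kept numbers, so every taken ball costs O(1) instead of O(n).
import Mathlib
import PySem

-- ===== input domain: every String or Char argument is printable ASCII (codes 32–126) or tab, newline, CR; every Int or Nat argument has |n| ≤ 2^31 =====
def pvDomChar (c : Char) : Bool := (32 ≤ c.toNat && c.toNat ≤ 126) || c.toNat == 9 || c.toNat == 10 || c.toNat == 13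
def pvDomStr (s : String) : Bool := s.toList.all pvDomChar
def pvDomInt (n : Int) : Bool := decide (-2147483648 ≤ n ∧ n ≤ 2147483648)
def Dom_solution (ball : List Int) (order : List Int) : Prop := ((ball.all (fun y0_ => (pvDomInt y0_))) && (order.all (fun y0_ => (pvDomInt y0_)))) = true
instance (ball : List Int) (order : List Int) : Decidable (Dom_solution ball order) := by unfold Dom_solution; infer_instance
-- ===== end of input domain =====

-- B replaces A's list mutation (pop(0)/pop(), list `keep` with linear `in`/remove) by two
-- pointers over the untouched ball list plus a dict counting kept numbers (objective: faster).
-- Note: A mutates its `ball` argument in place; B does not — the equivalence proved here is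
-- about the RETURN value only.

-- ===== PORT A =====
-- inner loop `for _ in range(K)` of the first branch: pops from the front while ball[0] is kept
def cascadeFrontA (ball keep ans : List Int) : Nat → List Int × List Int × List Int
  | 0 => (ball, keep, ans)
  | k+1 =>
    match ball with
    | [] => ([], keep, ans)  -- Python raises IndexError here (ball[0] on []); outside Pre_solution
    | b :: rest =>
      if b ∈ keep then
        -- keep.remove(b) after `b in keep`: remove? is some here, getD is never the fallback
        cascadeFrontA rest ((PySem.List.remove? keep b).getD keep) (ans ++ [b]) k
      else cascadeFrontA (b :: rest) keep ans k

-- inner loop of the second branch: pops from the back while ball[-1] is kept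
def cascadeBackA (ball keep ans : List Int) : Nat → List Int × List Int × List Int
  | 0 => (ball, keep, ans)
  | k+1 =>
    match ball.getLast? with
    | none => (ball, keep, ans)  -- Python raises IndexError here (ball[-1] on []); outside Pre_solution
    | some b =>
      if b ∈ keep then
        cascadeBackA ball.dropLast ((PySem.List.remove? keep b).getD keep) (ans ++ [b]) k
      else cascadeBackA ball keep ans k

-- one iteration of A's `for num in order` over the state (ball, keep, answer)
def stepA (st : List Int × List Int × List Int) (num : Int) : List Int × List Int × List Int :=
  match st with
  | (ball, keep, ans) =>
    match ball with
    | [] => ([], keep, ans)  -- Python raises IndexError (ball[0] on an empty list); outside Pre_solution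
    | b :: rest =>
      if num = b then
        if rest = [] then (rest, keep, ans ++ [b])
        else cascadeFrontA rest keep (ans ++ [b]) keep.length
      else if num = (b :: rest).getLast (List.cons_ne_nil b rest) then
        let c := (b :: rest).getLast (List.cons_ne_nil b rest)
        if (b :: rest).dropLast = [] then ((b :: rest).dropLast, keep, ans ++ [c])
        else cascadeBackA ((b :: rest).dropLast) keep (ans ++ [c]) keep.length
      else (ball, keep ++ [num], ans)

def solution (ball : List Int) (order : List Int) : List Int :=
  (order.foldl stepA (ball, ([] : List Int), ([] : List Int))).2.2

-- ===== PORT B =====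
-- B's front while-loop: advance lo while keep counts ball[lo]
def cascadeF (ball : List Int) (lo hi : Int) (keep : PySem.Dict Int Int) (ans : List Int) :
    Int × PySem.Dict Int Int × List Int :=
  if h : lo ≤ hi ∧ 0 < keep.getD (PySem.List.pyGetD ball lo 0) 0 then
    cascadeF ball (lo + 1) hi
      (keep.insert (PySem.List.pyGetD ball lo 0) (keep.getD (PySem.List.pyGetD ball lo 0) 0 - 1))
      (ans ++ [PySem.List.pyGetD ball lo 0])
  else (lo, keep, ans)
termination_by (hi + 1 - lo).toNat
decreasing_by
  have h1 := h.1
  omega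

-- B's back while-loop: retreat hi while keep counts ball[hi]
def cascadeB (ball : List Int) (lo hi : Int) (keep : PySem.Dict Int Int) (ans : List Int) :
    Int × PySem.Dict Int Int × List Int :=
  if h : lo ≤ hi ∧ 0 < keep.getD (PySem.List.pyGetD ball hi 0) 0 then
    cascadeB ball lo (hi - 1)
      (keep.insert (PySem.List.pyGetD ball hi 0) (keep.getD (PySem.List.pyGetD ball hi 0) 0 - 1))
      (ans ++ [PySem.List.pyGetD ball hi 0])
  else (hi, keep, ans)
termination_by (hi + 1 - lo).toNat
decreasing_by
  have h1 := h.1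
  omega

-- one iteration of B's `for num in order` over the state (lo, hi, keep, answer);
-- ball[lo]/ball[hi] are read only under `lo <= hi`, where the index is in range by construction
def stepB (ball : List Int) (st : Int × Int × PySem.Dict Int Int × List Int) (num : Int) :
    Int × Int × PySem.Dict Int Int × List Int :=
  match st with
  | (lo, hi, keep, ans) =>
    if lo ≤ hi ∧ num = PySem.List.pyGetD ball lo 0 then
      match cascadeF ball (lo + 1) hi keep (ans ++ [num]) with
      | (lo', keep', ans') => (lo', hi, keep', ans')
    else if lo ≤ hi ∧ num = PySem.List.pyGetD ball hi 0 then
      match cascadeB ball lo (hi - 1) keep (ans ++ [num]) with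
      | (hi', keep', ans') => (lo, hi', keep', ans')
    else (lo, hi, keep.insert num (keep.getD num 0 + 1), ans)

def solution_alt (ball : List Int) (order : List Int) : List Int :=
  (order.foldl (stepB ball) (0, PySem.List.len ball - 1, PySem.Dict.empty, ([] : List Int))).2.2.2

-- ===== PRECONDITION & SPEC =====
-- Pre_ excludes exactly the inputs on which A raises IndexError: those where the multiset of
-- balls is exhausted before the last order element, i.e. order is nonempty and every ball value
-- occurs in order-without-its-last-element at least as often as in ball; on every other input A
-- returns normally and B matches it.
def Pre_solution (ball : List Int) (order : List Int) : Prop :=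
  order = [] ∨ ∃ v ∈ ball, (order.dropLast).count v < ball.count v
instance (ball : List Int) (order : List Int) : Decidable (Pre_solution ball order) := by
  unfold Pre_solution; infer_instance

def pvWitness_solution : List Int × List Int := ([1, 2, 3], [2, 3, 1])

def Spec_solution (ball : List Int) (order : List Int) (out : List Int) : Prop :=
  out = solution_alt ball order
instance (ball : List Int) (order : List Int) (out : List Int) : Decidable (Spec_solution ball order out) := by
  unfold Spec_solution; infer_instance

-- ===== CLAIM (what is proved, stated in full; the proofs are below) =====
def Claim_equal_solution : Prop := ∀ (ball : List Int) (order : List Int),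
  Dom_solution ball order → Pre_solution ball order → Spec_solution ball order (solution ball order)

-- ===== LEMMAS AND PROOFS =====

-- the contiguous segment ball[i:j] that A's mutated list equals
def sl (ball : List Int) (i j : Nat) : List Int := (ball.take j).drop i

theorem sl_nil (ball : List Int) (i j : Nat) (h : j ≤ i) : sl ball i j = [] := by
  unfold sl
  apply List.drop_eq_nil_of_le
  calc (ball.take j).length ≤ j := by simp
    _ ≤ i := h

theorem sl_cons (ball : List Int) (i j : Nat) (h1 : i < j) (h2 : j ≤ ball.length) :
    sl ball i j = ball[i]'(lt_of_lt_of_le h1 h2) :: sl ball (i+1) j := by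
  unfold sl
  rw [List.drop_eq_getElem_cons (i := i) (by rw [List.length_take]; omega)]
  simp [List.getElem_take]

theorem sl_concat (ball : List Int) (i j : Nat) (h1 : i < j) (h2 : j ≤ ball.length) :
    sl ball i j = sl ball i (j-1) ++ [ball[j-1]'(by omega)] := by
  unfold sl
  have hj : j - 1 < ball.length := by omega
  have h := List.take_concat_get (l := ball) (i := j - 1) hj
  rw [show j - 1 + 1 = j by omega] at h
  rw [← h, List.concat_eq_append, List.drop_append_of_le_length (by rw [List.length_take]; omega)]

theorem stuckF_head {b : Int} {keep : List Int} (hb : b ∉ keep) (rest ans : List Int) (k : Nat) :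
    cascadeFrontA (b :: rest) keep ans k = (b :: rest, keep, ans) := by
  induction k with
  | zero => rfl
  | succ k ih => simp only [cascadeFrontA, if_neg hb]; exact ih

theorem stuckF_nil (keep ans : List Int) (k : Nat) :
    cascadeFrontA [] keep ans k = ([], keep, ans) := by
  cases k <;> rfl

theorem stuckB_nil (keep ans : List Int) (k : Nat) :
    cascadeBackA [] keep ans k = ([], keep, ans) := by
  cases k <;> rfl

theorem stuckB_last {b : Int} {ball keep : List Int} (hl : ball.getLast? = some b)
    (hb : b ∉ keep) (ans : List Int) (k : Nat) :
    cascadeBackA ball keep ans k = (ball, keep, ans) := by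
  induction k with
  | zero => rfl
  | succ k ih => simp only [cascadeBackA]; rw [hl]; simp only [if_neg hb]; exact ih

-- A's keep list and B's keep dict describe the same multiset of kept numbers
def cnt (keep : List Int) (d : PySem.Dict Int Int) : Prop :=
  ∀ v : Int, (keep.count v : Int) = d.getD v 0

theorem cnt_pos {keep : List Int} {d : PySem.Dict Int Int} (h : cnt keep d) {b : Int} :
    b ∈ keep ↔ 0 < d.getD b 0 := by
  rw [← h b]
  exact_mod_cast List.count_pos_iff.symm

theorem cnt_dec {keep : List Int} {d : PySem.Dict Int Int} (h : cnt keep d) {b : Int}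
    (hb : b ∈ keep) : cnt (keep.erase b) (d.insert b (d.getD b 0 - 1)) := by
  intro v
  rw [PySem.Dict.getD_insert]
  by_cases hv : v = b
  · subst hv
    rw [if_pos rfl, List.count_erase_self, ← h v]
    have : 1 ≤ keep.count v := List.count_pos_iff.mpr hb
    omega
  · rw [if_neg hv, List.count_erase_of_ne (fun he => hv he), h v]

theorem cnt_inc {keep : List Int} {d : PySem.Dict Int Int} (h : cnt keep d) (num : Int) :
    cnt (keep ++ [num]) (d.insert num (d.getD num 0 + 1)) := by
  intro v
  rw [PySem.Dict.getD_insert, List.count_append]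
  by_cases hv : v = num
  · subst hv
    rw [if_pos rfl, ← h v]
    simp
  · rw [if_neg hv, ← h v]
    simp [List.count_cons]
    exact fun he => hv he.symm

theorem cascF_spec (ball : List Int) :
    ∀ (k : Nat) (i j : Nat) (keep : List Int) (d : PySem.Dict Int Int) (ans : List Int),
    i ≤ j → j ≤ ball.length →
    cnt keep d → keep.length ≤ k →
    ∃ (i' : Nat) (keep' : List Int) (d' : PySem.Dict Int Int) (ans' : List Int), i ≤ i' ∧ i' ≤ j ∧
      cascadeF ball (i : Int) ((j : Int) - 1) d ans = ((i' : Int), d', ans') ∧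
      cascadeFrontA (sl ball i j) keep ans k = (sl ball i' j, keep', ans') ∧
      ans' ++ sl ball i' j = ans ++ sl ball i j ∧
      (ans' ++ keep').Perm (ans ++ keep) ∧
      cnt keep' d' := by
  intro k
  induction k with
  | zero =>
    intro i j keep d ans hij hj hcnt hlen
    have hk : keep = [] := List.eq_nil_of_length_eq_zero (Nat.le_zero.mp hlen)
    subst hk
    refine ⟨i, [], d, ans, le_rfl, hij, ?_, rfl, rfl, List.Perm.refl _, hcnt⟩
    rw [cascadeF, dif_neg]
    rintro ⟨-, hpos⟩
    have := hcnt (PySem.List.pyGetD ball (i : Int) 0)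
    simp only [List.count_nil, Nat.cast_zero] at this
    omega
  | succ k ih =>
    intro i j keep d ans hij hj hcnt hlen
    by_cases hlt : i < j
    · have hib : i < ball.length := lt_of_lt_of_le hlt hj
      have hcons := sl_cons ball i j hlt hj
      have hget : PySem.List.pyGetD ball (i : Int) 0 = ball[i] := by
        rw [PySem.List.pyGetD_natCast]; exact List.getD_eq_getElem _ _ hib
      by_cases hmem : ball[i] ∈ keep
      · have hrem : (PySem.List.remove? keep ball[i]).getD keep = keep.erase ball[i] := by
          rw [PySem.List.remove?_eq_some_erase keep _ hmem]; rfl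
        obtain ⟨i', keep', d', ans', h1, h2, h3, h4, h5, h6, h7⟩ :=
          ih (i+1) j (keep.erase ball[i]) (d.insert ball[i] (d.getD ball[i] 0 - 1))
            (ans ++ [ball[i]]) (by omega) hj
            (cnt_dec hcnt hmem)
            (by rw [List.length_erase_of_mem hmem]; omega)
        refine ⟨i', keep', d', ans', by omega, h2, ?_, ?_, ?_, ?_, h7⟩
        · rw [cascadeF, dif_pos ⟨by omega, by rw [hget]; exact (cnt_pos hcnt).mp hmem⟩]
          rw [hget, show ((i : Int) + 1) = ((i + 1 : Nat) : Int) by push_cast; ring]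
          exact h3
        · rw [hcons]
          simp only [cascadeFrontA, if_pos hmem, hrem]
          exact h4
        · rw [h5, hcons]; simp
        · refine h6.trans ?_
          rw [List.append_assoc]
          refine List.Perm.append_left ans ?_
          exact (List.perm_cons_erase hmem).symm
      · refine ⟨i, keep, d, ans, le_rfl, hij, ?_, ?_, rfl, List.Perm.refl _, hcnt⟩
        · rw [cascadeF, dif_neg]
          rintro ⟨-, hpos⟩
          rw [hget] at hpos
          exact hmem ((cnt_pos hcnt).mpr hpos)
        · rw [hcons]; exact stuckF_head hmem _ _ _
    · have hnil : sl ball i j = [] := sl_nil ball i j (by omega)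
      refine ⟨i, keep, d, ans, le_rfl, hij, ?_, ?_, rfl, List.Perm.refl _, hcnt⟩
      · rw [cascadeF, dif_neg]
        rintro ⟨hc, -⟩
        omega
      · rw [hnil]; exact stuckF_nil _ _ _

theorem cascB_spec (ball : List Int) :
    ∀ (k : Nat) (i j : Nat) (keep : List Int) (d : PySem.Dict Int Int) (ans : List Int),
    i ≤ j → j ≤ ball.length →
    cnt keep d → keep.length ≤ k →
    ∃ (j' : Nat) (keep' : List Int) (d' : PySem.Dict Int Int) (ans' : List Int), i ≤ j' ∧ j' ≤ j ∧
      cascadeB ball (i : Int) ((j : Int) - 1) d ans = ((j' : Int) - 1, d', ans') ∧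
      cascadeBackA (sl ball i j) keep ans k = (sl ball i j', keep', ans') ∧
      (ans' ++ sl ball i j').Perm (ans ++ sl ball i j) ∧
      (ans' ++ keep').Perm (ans ++ keep) ∧
      cnt keep' d' := by
  intro k
  induction k with
  | zero =>
    intro i j keep d ans hij hj hcnt hlen
    have hk : keep = [] := List.eq_nil_of_length_eq_zero (Nat.le_zero.mp hlen)
    subst hk
    refine ⟨j, [], d, ans, hij, le_rfl, ?_, rfl, List.Perm.refl _, List.Perm.refl _, hcnt⟩
    rw [cascadeB, dif_neg]
    rintro ⟨-, hpos⟩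
    have := hcnt (PySem.List.pyGetD ball ((j : Int) - 1) 0)
    simp only [List.count_nil, Nat.cast_zero] at this
    omega
  | succ k ih =>
    intro i j keep d ans hij hj hcnt hlen
    by_cases hlt : i < j
    · have hjb : j - 1 < ball.length := by omega
      have hcat := sl_concat ball i j hlt hj
      have hlast : (sl ball i j).getLast? = some (ball[j-1]'hjb) := by
        rw [hcat]; simp
      have hget : PySem.List.pyGetD ball ((j : Int) - 1) 0 = ball[j-1]'hjb := by
        rw [show ((j : Int) - 1) = ((j - 1 : Nat) : Int) by omega, PySem.List.pyGetD_natCast]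
        exact List.getD_eq_getElem _ _ hjb
      by_cases hmem : ball[j-1]'hjb ∈ keep
      · have hrem : (PySem.List.remove? keep (ball[j-1]'hjb)).getD keep = keep.erase (ball[j-1]'hjb) := by
          rw [PySem.List.remove?_eq_some_erase keep _ hmem]; rfl
        obtain ⟨j', keep', d', ans', h1, h2, h3, h4, h5, h6, h7⟩ :=
          ih i (j-1) (keep.erase (ball[j-1]'hjb))
            (d.insert (ball[j-1]'hjb) (d.getD (ball[j-1]'hjb) 0 - 1))
            (ans ++ [ball[j-1]'hjb]) (by omega) (by omega)
            (cnt_dec hcnt hmem)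
            (by rw [List.length_erase_of_mem hmem]; omega)
        refine ⟨j', keep', d', ans', h1, by omega, ?_, ?_, ?_, ?_, h7⟩
        · rw [cascadeB, dif_pos ⟨by omega, by rw [hget]; exact (cnt_pos hcnt).mp hmem⟩]
          rw [hget, show ((j : Int) - 1 - 1) = ((j - 1 : Nat) : Int) - 1 by omega]
          exact h3
        · rw [hcat]
          simp only [cascadeBackA]
          rw [show (sl ball i (j-1) ++ [ball[j-1]'hjb]).getLast? = some (ball[j-1]'hjb) by simp]
          simp only [if_pos hmem, hrem]
          rw [show (sl ball i (j-1) ++ [ball[j-1]'hjb]).dropLast = sl ball i (j-1) by simp]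
          exact h4
        · refine h5.trans ?_
          rw [hcat, List.append_assoc]
          exact List.Perm.append_left ans List.perm_append_comm
        · refine h6.trans ?_
          rw [List.append_assoc]
          exact List.Perm.append_left ans (List.perm_cons_erase hmem).symm
      · refine ⟨j, keep, d, ans, hij, le_rfl, ?_, ?_, List.Perm.refl _, List.Perm.refl _, hcnt⟩
        · rw [cascadeB, dif_neg]
          rintro ⟨-, hpos⟩
          rw [hget] at hpos
          exact hmem ((cnt_pos hcnt).mpr hpos)
        · exact stuckB_last hlast hmem _ _
    · have hnil : sl ball i j = [] := sl_nil ball i j (by omega)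
      refine ⟨j, keep, d, ans, hij, le_rfl, ?_, ?_, List.Perm.refl _, List.Perm.refl _, hcnt⟩
      · rw [cascadeB, dif_neg]
        rintro ⟨hc, -⟩
        omega
      · rw [hnil]; exact stuckB_nil _ _ _

theorem main_inv (ball order : List Int) (hpre : Pre_solution ball order) :
    ∀ (os ps : List Int) (i j : Nat) (keep : List Int) (d : PySem.Dict Int Int) (ans : List Int),
    order = ps ++ os → i ≤ j → j ≤ ball.length →
    ball.Perm (ans ++ sl ball i j) →
    (ans ++ keep).Perm ps →
    cnt keep d →
    (os.foldl stepA (sl ball i j, keep, ans)).2.2 =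
      (os.foldl (stepB ball) ((i : Int), (j : Int) - 1, d, ans)).2.2.2 := by
  intro os
  induction os with
  | nil => intro ps i j keep d ans _ _ _ _ _ _; rfl
  | cons num os' ih =>
    intro ps i j keep d ans hord hij hj hperm hkp hcnt
    have hlt : i < j := by
      by_contra h
      -- segment empty: ans is a permutation of ball, ans ++ keep of ps, ps a prefix of
      -- order.dropLast — contradicting Pre_solution's witness value
      rw [sl_nil ball i j (by omega)] at hperm
      simp only [List.append_nil] at hperm
      have hne : order ≠ [] := by rw [hord]; simp
      rcases hpre with hpre | ⟨v, hv, hc⟩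
      · exact hne hpre
      have hdl : order.dropLast = ps ++ (num :: os').dropLast := by
        rw [hord, List.dropLast_append_cons]
      have e1 : ball.count v = ans.count v := hperm.count_eq v
      have e2 : (ans ++ keep).count v = ps.count v := hkp.count_eq v
      rw [List.count_append] at e2
      have e3 : ps.count v ≤ (order.dropLast).count v := by
        rw [hdl, List.count_append]; omega
      omega
    have hib : i < ball.length := lt_of_lt_of_le hlt hj
    have hjb : j - 1 < ball.length := by omega
    have hcons := sl_cons ball i j hlt hj
    have hcat := sl_concat ball i j hlt hj
    have hgetl : PySem.List.pyGetD ball (i : Int) 0 = ball[i] := by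
      rw [PySem.List.pyGetD_natCast]; exact List.getD_eq_getElem _ _ hib
    have hgetr : PySem.List.pyGetD ball ((j : Int) - 1) 0 = ball[j-1]'hjb := by
      rw [show ((j : Int) - 1) = ((j - 1 : Nat) : Int) by omega, PySem.List.pyGetD_natCast]
      exact List.getD_eq_getElem _ _ hjb
    have hord' : order = (ps ++ [num]) ++ os' := by rw [hord]; simp
    have hkp' : ((ans ++ [num]) ++ keep).Perm (ps ++ [num]) := by
      have h1 : ((ans ++ [num]) ++ keep).Perm ((ans ++ keep) ++ [num]) := by
        simp only [List.append_assoc]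
        exact List.Perm.append_left ans (List.perm_append_comm (l₁ := [num]) (l₂ := keep))
      exact h1.trans (hkp.append_right _)
    simp only [List.foldl_cons]
    rw [hcons]
    by_cases hnb : num = ball[i]
    · -- front pop
      obtain ⟨i', keep', d', ans', g1, g2, g3, g4, g5, g6, g7⟩ :=
        cascF_spec ball keep.length (i+1) j keep d (ans ++ [num]) (by omega) hj hcnt le_rfl
      -- A's state after this step is (sl ball i' j, keep', ans')
      have hA : stepA (ball[i] :: sl ball (i+1) j, keep, ans) num = (sl ball i' j, keep', ans') := by
        simp only [stepA, if_pos hnb]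
        rw [hnb] at g4
        by_cases hrest : sl ball (i+1) j = []
        · rw [if_pos hrest]
          rw [hrest, stuckF_nil] at g4
          rw [← g4, hrest]
        · rw [if_neg hrest]
          exact g4
      have hB : stepB ball ((i : Int), (j : Int) - 1, d, ans) num =
          ((i' : Int), (j : Int) - 1, d', ans') := by
        simp only [stepB]
        rw [if_pos ⟨by omega, by rw [hgetl]; exact hnb⟩]
        rw [show ((i : Int) + 1) = ((i + 1 : Nat) : Int) by push_cast; ring, g3]
      rw [hA, hB]
      refine ih (ps ++ [num]) i' j keep' d' ans' hord' g2 hj ?_ ?_ g7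
      · rw [g5]
        have e1 : ans ++ sl ball i j = (ans ++ [num]) ++ sl ball (i+1) j := by
          rw [hcons, hnb]; simp
        exact e1 ▸ hperm
      · exact g6.trans hkp'
    · by_cases hnc : num = ball[j-1]'hjb
      · -- back pop
        have hconcat : ball[i] :: sl ball (i+1) j = sl ball i (j-1) ++ [ball[j-1]'hjb] := by
          rw [← hcons, hcat]
        have hgl : (ball[i] :: sl ball (i+1) j).getLast (List.cons_ne_nil _ _) = ball[j-1]'hjb := by
          have h2 : (ball[i] :: sl ball (i+1) j).getLast? = some (ball[j-1]'hjb) := by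
            rw [← hcons, hcat]; simp
          have h1 := List.getLast?_eq_some_getLast (l := ball[i] :: sl ball (i+1) j) (List.cons_ne_nil _ _)
          rw [h1] at h2
          exact Option.some.inj h2
        have hdl : (ball[i] :: sl ball (i+1) j).dropLast = sl ball i (j-1) := by
          rw [hconcat]; simp
        obtain ⟨j', keep', d', ans', g1, g2, g3, g4, g5, g6, g7⟩ :=
          cascB_spec ball keep.length i (j-1) keep d (ans ++ [num]) (by omega) (by omega) hcnt le_rfl
        have hA : stepA (ball[i] :: sl ball (i+1) j, keep, ans) num = (sl ball i j', keep', ans') := by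
          simp only [stepA, if_neg hnb]
          rw [if_pos (hgl ▸ hnc), hgl, hdl]
          rw [hnc] at g4
          by_cases hrest : sl ball i (j-1) = []
          · rw [if_pos hrest]
            rw [hrest, stuckB_nil] at g4
            rw [← g4, hrest]
          · rw [if_neg hrest]
            exact g4
        have hB : stepB ball ((i : Int), (j : Int) - 1, d, ans) num =
            ((i : Int), (j' : Int) - 1, d', ans') := by
          simp only [stepB]
          rw [if_neg (by rintro ⟨-, hc⟩; rw [hgetl] at hc; exact hnb hc)]
          rw [if_pos ⟨by omega, by rw [hgetr]; exact hnc⟩]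
          rw [show ((j : Int) - 1 - 1) = (((j - 1 : Nat) : Int) - 1) by omega, g3]
        rw [hA, hB]
        refine ih (ps ++ [num]) i j' keep' d' ans' hord' g1 (by omega) ?_ ?_ g7
        · have e1 : ans ++ sl ball i j = ans ++ (sl ball i (j-1) ++ [num]) := by
            rw [hcat, hnc]
          have p2 : (ans ++ (sl ball i (j-1) ++ [num])).Perm ((ans ++ [num]) ++ sl ball i (j-1)) := by
            simp only [List.append_assoc]
            exact List.Perm.append_left ans (List.perm_append_comm (l₁ := sl ball i (j-1)) (l₂ := [num]))
          exact ((e1 ▸ hperm).trans p2).trans g5.symm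
        · exact g6.trans hkp'
      · -- kept
        have hgl : (ball[i] :: sl ball (i+1) j).getLast (List.cons_ne_nil _ _) = ball[j-1]'hjb := by
          have h2 : (ball[i] :: sl ball (i+1) j).getLast? = some (ball[j-1]'hjb) := by
            rw [← hcons, hcat]; simp
          have h1 := List.getLast?_eq_some_getLast (l := ball[i] :: sl ball (i+1) j) (List.cons_ne_nil _ _)
          rw [h1] at h2
          exact Option.some.inj h2
        have hA : stepA (ball[i] :: sl ball (i+1) j, keep, ans) num =
            (ball[i] :: sl ball (i+1) j, keep ++ [num], ans) := by
          simp only [stepA, if_neg hnb]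
          rw [if_neg (hgl ▸ hnc)]
        have hB : stepB ball ((i : Int), (j : Int) - 1, d, ans) num =
            ((i : Int), (j : Int) - 1, d.insert num (d.getD num 0 + 1), ans) := by
          simp only [stepB]
          rw [if_neg (by rintro ⟨-, hc⟩; rw [hgetl] at hc; exact hnb hc)]
          rw [if_neg (by rintro ⟨-, hc⟩; rw [hgetr] at hc; exact hnc hc)]
        rw [hA, hB, ← hcons]
        refine ih (ps ++ [num]) i j (keep ++ [num]) (d.insert num (d.getD num 0 + 1)) ans
          hord' hij hj hperm ?_ (cnt_inc hcnt num)
        rw [← List.append_assoc]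
        exact hkp.append_right _

-- ===== VERDICT (by name: the statement is the Claim_ definition above) =====
theorem solution_spec : Claim_equal_solution := by
  intro ball order _ hpre
  unfold Spec_solution solution solution_alt
  have h := main_inv ball order hpre order [] 0 ball.length [] PySem.Dict.empty []
    rfl (Nat.zero_le _) le_rfl (by simp [sl]) (by simp) (by intro v; simp)
  simpa [sl, PySem.List.len_eq] using h
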